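-- pv_equiv track=rewrite | github.com/nitsas/codejamsolutions | Consonants/runme.py | match_positions
-- ===== SOURCE A (Python) =====
-- def match_positions(string, n):
--     num_consecutive_consonants = 0
--     for i in range(len(string)):
--         if string[i] in 'aeiou':
--             # encountered a vowel
--             num_consecutive_consonants = 0
--         else:
--             # encountered a consonant
--             num_consecutive_consonants += 1
--             if num_consecutive_consonants >= n:
--                 # found another match
--                 yield i - n + 1
-- ===== SOURCE B (Python) =====
-- def match_positions(string, n):
--     # Phase 1: collect the maximal consonant runs as (start, length) pairs.
--     runs = []
--     start = None
--     for i, c in enumerate(string):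
--         if c in 'aeiou':
--             if start is not None:
--                 runs.append((start, i - start))
--                 start = None
--         elif start is None:
--             start = i
--     if start is not None:
--         runs.append((start, len(string) - start))
--     # Phase 2: each run (s, length) contributes one match per index
--     # i in [s + max(0, n - 1), s + length).
--     for s, length in runs:
--         for i in range(s + max(0, n - 1), s + length):
--             yield i - n + 1
-- ===== Notes on version B (the rewrite author's own statement) =====
-- stated objective: alternative
-- what changed: Replaces the per-character rolling consonant counter by a two-phase pass: first collect the maximal consonant runs as (start, length) pairs, then emit each run's match positions as an arithmetic range, so detection and emission are decoupled.
import Mathlib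
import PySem

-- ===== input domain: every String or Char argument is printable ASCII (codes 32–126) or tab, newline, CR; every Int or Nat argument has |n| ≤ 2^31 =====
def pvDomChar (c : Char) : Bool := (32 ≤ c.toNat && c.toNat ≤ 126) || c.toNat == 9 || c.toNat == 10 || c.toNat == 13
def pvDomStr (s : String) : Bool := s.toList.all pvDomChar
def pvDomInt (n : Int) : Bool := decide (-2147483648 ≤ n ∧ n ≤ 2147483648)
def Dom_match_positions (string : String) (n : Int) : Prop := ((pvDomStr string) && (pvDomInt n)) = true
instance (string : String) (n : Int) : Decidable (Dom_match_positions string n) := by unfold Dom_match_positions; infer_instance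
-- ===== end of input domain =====

-- B reorganises A's rolling consonant counter into a two-phase run-collection pass; same return values, proved equal.
-- ===== PORT A =====
-- the generator loop: state = (index i, num_consecutive_consonants); yields collected in order
-- string[i] in 'aeiou'
def isVowel (c : Char) : Bool := c ∈ "aeiou".toList

def goA : List Char → Int → Int → Int → List Int
  | [], _, _, _ => []
  | c :: rest, i, cnt, n =>
    if isVowel c then
      goA rest (i + 1) 0 n
    else
      if cnt + 1 ≥ n then (i - n + 1) :: goA rest (i + 1) (cnt + 1) n
      else goA rest (i + 1) (cnt + 1) n

def match_positions (string : String) (n : Int) : List Int :=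
  goA string.toList 0 0 n

-- ===== PORT B =====
-- phase 1: collect maximal consonant runs as (start, length); st = current open run start
def collectRuns : List Char → Int → Option Int → List (Int × Int)
  | [], _, none => []
  | [], i, some s => [(s, i - s)]
  | c :: rest, i, st =>
    if isVowel c then
      match st with
      | some s => (s, i - s) :: collectRuns rest (i + 1) none
      | none => collectRuns rest (i + 1) none
    else
      match st with
      | some s => collectRuns rest (i + 1) (some s)
      | none => collectRuns rest (i + 1) (some i)

-- phase 2: each run (s, L) contributes range(s + max(0, n-1), s + L), mapped to i - n + 1
def emitRun (n : Int) (r : Int × Int) : List Int :=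
  (PySem.List.pyRange (r.1 + max 0 (n - 1)) (r.1 + r.2) 1).map (fun i => i - n + 1)

def match_positions_alt (string : String) (n : Int) : List Int :=
  (collectRuns string.toList 0 none).flatMap (emitRun n)

-- ===== PRECONDITION & SPEC =====
def Spec_match_positions (string : String) (n : Int) (out : List Int) : Prop := out = match_positions_alt string n
instance (string : String) (n : Int) (out : List Int) : Decidable (Spec_match_positions string n out) := by unfold Spec_match_positions; infer_instance

-- ===== CLAIM (what is proved, stated in full; the proofs are below) =====
def Claim_equal_match_positions : Prop := ∀ (string : String) (n : Int), Dom_match_positions string n → Spec_match_positions string n (match_positions string n)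

-- ===== LEMMAS AND PROOFS =====

-- ===== VERDICT (by name: the statement is the Claim_ definition above) =====
-- one step of a run's emission range
theorem emitRun_succ (n s cnt : Int) (h : 0 ≤ cnt) :
    emitRun n (s, cnt + 1)
      = emitRun n (s, cnt) ++ (if cnt + 1 ≥ n then [s + cnt - n + 1] else []) := by
  unfold emitRun
  simp only
  rw [show s + (cnt + 1) = (s + cnt) + 1 by ring]
  by_cases hc : cnt + 1 ≥ n
  · rw [PySem.List.pyRange_one_succ_right (by omega), if_pos hc]
    simp
  · rw [PySem.List.pyRange_one_eq_nil (by omega), PySem.List.pyRange_one_eq_nil (by omega),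
      if_neg hc]
    simp

-- combined invariant: closed-run case and open-run case
theorem main_inv (n : Int) (chars : List Char) :
    (∀ i : Int, goA chars i 0 n = (collectRuns chars i none).flatMap (emitRun n)) ∧
    (∀ i cnt : Int, 1 ≤ cnt →
      (collectRuns chars i (some (i - cnt))).flatMap (emitRun n)
        = emitRun n (i - cnt, cnt) ++ goA chars i cnt n) := by
  induction chars with
  | nil =>
    refine ⟨fun i => rfl, fun i cnt hc => ?_⟩
    have h : i - (i - cnt) = cnt := by ring
    simp [collectRuns, goA, h]
  | cons c rest ih =>
    obtain ⟨ih0, ih1⟩ := ih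
    by_cases hv : isVowel c
    · refine ⟨fun i => ?_, fun i cnt hc => ?_⟩
      · simp [goA, collectRuns, hv, ih0]
      · simp only [goA, collectRuns, hv, if_true, List.flatMap_cons]
        rw [ih0 (i + 1)]
        have h : i - (i - cnt) = cnt := by ring
        rw [h]
    · refine ⟨fun i => ?_, fun i cnt hc => ?_⟩
      · simp only [goA, collectRuns, hv, Bool.false_eq_true, if_false]
        have h1 := ih1 (i + 1) 1 le_rfl
        have he : (i + 1) - 1 = i := by ring
        rw [he] at h1
        rw [h1]
        have : emitRun n (i, 1) = if 0 + 1 ≥ n then [i - n + 1] else [] := by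
          have := emitRun_succ n i 0 le_rfl
          simpa [emitRun, PySem.List.pyRange_one_eq_nil (le_refl i)] using this
        rw [this]
        by_cases hn : (0:Int) + 1 ≥ n
        · rw [if_pos hn, if_pos (by omega)]
          rfl
        · rw [if_neg hn, if_neg (by omega)]
          rfl
      · simp only [goA, collectRuns, hv, Bool.false_eq_true, if_false]
        have h1 := ih1 (i + 1) (cnt + 1) (by omega)
        have he : (i + 1) - (cnt + 1) = i - cnt := by ring
        rw [he] at h1
        rw [h1, emitRun_succ n (i - cnt) cnt (by omega)]
        by_cases hn : cnt + 1 ≥ n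
        · rw [if_pos hn, if_pos hn]
          have : i - cnt + cnt - n + 1 = i - n + 1 := by ring
          rw [this]
          simp
        · rw [if_neg hn, if_neg hn]
          simp

theorem match_positions_spec : Claim_equal_match_positions := by
  intro string n _
  unfold Spec_match_positions match_positions match_positions_alt
  exact (main_inv n string.toList).1 0
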